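-- pv_equiv track=rewrite | github.com/SINHOLEE/Algorithm | python/라인/2.py | third
-- ===== SOURCE A (Python) =====
-- def third(inp_str):
--     cnt=set()
--     for char in inp_str:
--         if (ord('A')<= ord(char)<=ord('Z')):
--             cnt.add(1)
--         elif (ord('a')<= ord(char)<=ord('z')):
--             cnt.add(2)
--         elif (ord('0')<= ord(char)<=ord('9')):
--             cnt.add(3)
--         elif char in ['~','!','@','#','$','%','^','&','*']:
--             cnt.add(4)
--
--     return len(cnt)>=3
-- ===== SOURCE B (Python) =====
-- def third(inp_str):
--     has_upper = any(ord('A') <= ord(c) <= ord('Z') for c in inp_str)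
--     has_lower = any(ord('a') <= ord(c) <= ord('z') for c in inp_str)
--     has_digit = any(ord('0') <= ord(c) <= ord('9') for c in inp_str)
--     has_special = any(c in ['~', '!', '@', '#', '$', '%', '^', '&', '*'] for c in inp_str)
--     return has_upper + has_lower + has_digit + has_special >= 3
-- ===== Notes on version B (the rewrite author's own statement) =====
-- stated objective: simpler
-- what changed: Replaces the single pass that accumulates category tags into a mutable set with four independent any() predicate scans whose boolean flags are summed, removing the set data structure entirely.
import Mathlib
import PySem

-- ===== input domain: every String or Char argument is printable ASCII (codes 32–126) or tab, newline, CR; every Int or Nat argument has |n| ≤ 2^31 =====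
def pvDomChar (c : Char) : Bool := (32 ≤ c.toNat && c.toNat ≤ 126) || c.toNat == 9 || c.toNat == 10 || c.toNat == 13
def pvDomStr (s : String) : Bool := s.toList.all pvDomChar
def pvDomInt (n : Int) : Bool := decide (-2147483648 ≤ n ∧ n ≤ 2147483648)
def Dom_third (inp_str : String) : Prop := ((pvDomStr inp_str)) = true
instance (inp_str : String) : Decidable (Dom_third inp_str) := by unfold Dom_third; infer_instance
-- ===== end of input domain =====

-- B replaces A's single set-accumulating pass by four independent any-scans whose boolean flags are summed (objective: simpler).


-- ===== PORT A =====
-- the special-character list from A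
def thirdSpecials : List Char := ['~', '!', '@', '#', '$', '%', '^', '&', '*']

-- the loop body of A: the if/elif chain adding a category tag to the set
def thirdStep (s : PySem.Set Int) (c : Char) : PySem.Set Int :=
  if 'A'.toNat ≤ c.toNat ∧ c.toNat ≤ 'Z'.toNat then PySem.Set.add s 1
  else if 'a'.toNat ≤ c.toNat ∧ c.toNat ≤ 'z'.toNat then PySem.Set.add s 2
  else if '0'.toNat ≤ c.toNat ∧ c.toNat ≤ '9'.toNat then PySem.Set.add s 3
  else if c ∈ thirdSpecials then PySem.Set.add s 4
  else s

def third (inp_str : String) : Bool :=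
  let cnt := inp_str.toList.foldl thirdStep PySem.Set.empty
  decide (3 ≤ PySem.Set.len cnt)

-- ===== PORT B =====
def third_alt (inp_str : String) : Bool :=
  let cs := inp_str.toList
  let hasUpper := cs.any (fun c => decide ('A'.toNat ≤ c.toNat ∧ c.toNat ≤ 'Z'.toNat))
  let hasLower := cs.any (fun c => decide ('a'.toNat ≤ c.toNat ∧ c.toNat ≤ 'z'.toNat))
  let hasDigit := cs.any (fun c => decide ('0'.toNat ≤ c.toNat ∧ c.toNat ≤ '9'.toNat))
  let hasSpecial := cs.any (fun c => decide (c ∈ thirdSpecials))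
  decide (3 ≤ (cond hasUpper 1 0) + (cond hasLower 1 0) + (cond hasDigit 1 0) + (cond hasSpecial 1 0 : Nat))

-- ===== PRECONDITION & SPEC =====
def Spec_third (inp_str : String) (out : Bool) : Prop := out = third_alt inp_str
instance (inp_str : String) (out : Bool) : Decidable (Spec_third inp_str out) := by unfold Spec_third; infer_instance

-- ===== CLAIM (what is proved, stated in full; the proofs are below) =====
def Claim_equal_third : Prop := ∀ (inp_str : String), Dom_third inp_str → Spec_third inp_str (third inp_str)

-- ===== LEMMAS AND PROOFS =====

-- the category tag A would add for a character (none if no branch fires)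
def thirdClass (c : Char) : Option Int :=
  if 'A'.toNat ≤ c.toNat ∧ c.toNat ≤ 'Z'.toNat then some 1
  else if 'a'.toNat ≤ c.toNat ∧ c.toNat ≤ 'z'.toNat then some 2
  else if '0'.toNat ≤ c.toNat ∧ c.toNat ≤ '9'.toNat then some 3
  else if c ∈ thirdSpecials then some 4
  else none

theorem thirdStep_eq (s : PySem.Set Int) (c : Char) :
    thirdStep s c = match thirdClass c with
      | some i => PySem.Set.add s i
      | none => s := by
  unfold thirdStep thirdClass
  split_ifs <;> rfl

-- membership in the fold result
theorem mem_fold (cs : List Char) (s : PySem.Set Int) (x : Int) :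
    x ∈ cs.foldl thirdStep s ↔ x ∈ s ∨ ∃ c ∈ cs, thirdClass c = some x := by
  induction cs generalizing s with
  | nil => simp
  | cons c cs ih =>
    simp only [List.foldl_cons, ih, thirdStep_eq]
    cases h : thirdClass c with
    | none =>
      simp only [List.mem_cons]
      constructor
      · rintro (hx | ⟨d, hd, hdc⟩)
        · exact Or.inl hx
        · exact Or.inr ⟨d, Or.inr hd, hdc⟩
      · rintro (hx | ⟨d, (rfl | hd), hdc⟩)
        · exact Or.inl hx
        · simp [h] at hdc
        · exact Or.inr ⟨d, hd, hdc⟩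
    | some i =>
      rw [PySem.Set.mem_add]
      simp only [List.mem_cons]
      constructor
      · rintro ((hx | rfl) | ⟨d, hd, hdc⟩)
        · exact Or.inl hx
        · exact Or.inr ⟨c, Or.inl rfl, h⟩
        · exact Or.inr ⟨d, Or.inr hd, hdc⟩
      · rintro (hx | ⟨d, (rfl | hd), hdc⟩)
        · exact Or.inl (Or.inl hx)
        · rw [h] at hdc; exact Or.inl (Or.inr (Option.some_injective _ hdc).symm)
        · exact Or.inr ⟨d, hd, hdc⟩

theorem nodup_fold (cs : List Char) (s : PySem.Set Int) (h : s.Nodup) :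
    (cs.foldl thirdStep s).Nodup := by
  induction cs generalizing s with
  | nil => exact h
  | cons c cs ih =>
    simp only [List.foldl_cons, thirdStep_eq]
    cases thirdClass c with
    | none => exact ih s h
    | some i => exact ih _ (PySem.Set.nodup_add s i h)

-- B's flags characterise the class of a character (the four categories are disjoint)
theorem class_upper (c : Char) :
    thirdClass c = some 1 ↔ ('A'.toNat ≤ c.toNat ∧ c.toNat ≤ 'Z'.toNat) := by
  unfold thirdClass; split_ifs <;> simp_all

theorem class_lower (c : Char) :
    thirdClass c = some 2 ↔ ('a'.toNat ≤ c.toNat ∧ c.toNat ≤ 'z'.toNat) := by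
  unfold thirdClass; split_ifs with h1 h2 <;> simp_all
  omega

theorem class_digit (c : Char) :
    thirdClass c = some 3 ↔ ('0'.toNat ≤ c.toNat ∧ c.toNat ≤ '9'.toNat) := by
  unfold thirdClass; split_ifs with h1 h2 h3 <;> simp_all <;> omega

theorem mem_specials_toNat (c : Char) (h : c ∈ thirdSpecials) :
    c.toNat = 126 ∨ c.toNat = 33 ∨ c.toNat = 64 ∨ c.toNat = 35 ∨ c.toNat = 36 ∨
    c.toNat = 37 ∨ c.toNat = 94 ∨ c.toNat = 38 ∨ c.toNat = 42 := by
  unfold thirdSpecials at h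
  simp only [List.mem_cons, List.not_mem_nil, or_false] at h
  rcases h with rfl | rfl | rfl | rfl | rfl | rfl | rfl | rfl | rfl <;> simp

theorem class_special (c : Char) :
    thirdClass c = some 4 ↔ c ∈ thirdSpecials := by
  unfold thirdClass
  split_ifs with h1 h2 h3 h4 <;> simp_all
  · intro h; rcases mem_specials_toNat c h with h' | h' | h' | h' | h' | h' | h' | h' | h' <;> omega
  · intro h; rcases mem_specials_toNat c h with h' | h' | h' | h' | h' | h' | h' | h' | h' <;> omega
  · intro h; rcases mem_specials_toNat c h with h' | h' | h' | h' | h' | h' | h' | h' | h' <;> omega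

theorem class_range (c : Char) (x : Int) (h : thirdClass c = some x) :
    x = 1 ∨ x = 2 ∨ x = 3 ∨ x = 4 := by
  unfold thirdClass at h
  split_ifs at h <;> simp_all

-- the canonical nodup list with the same membership as the fold result
def flagList (f1 f2 f3 f4 : Bool) : List Int :=
  (cond f1 [1] []) ++ (cond f2 [2] []) ++ (cond f3 [3] []) ++ (cond f4 [4] [])

theorem flagList_nodup (f1 f2 f3 f4 : Bool) : (flagList f1 f2 f3 f4).Nodup := by
  cases f1 <;> cases f2 <;> cases f3 <;> cases f4 <;> decide

theorem flagList_length (f1 f2 f3 f4 : Bool) :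
    (flagList f1 f2 f3 f4).length =
      (cond f1 1 0) + (cond f2 1 0) + (cond f3 1 0) + (cond f4 1 0) := by
  cases f1 <;> cases f2 <;> cases f3 <;> cases f4 <;> decide

theorem mem_flagList (f1 f2 f3 f4 : Bool) (x : Int) :
    x ∈ flagList f1 f2 f3 f4 ↔
      (x = 1 ∧ f1 = true) ∨ (x = 2 ∧ f2 = true) ∨ (x = 3 ∧ f3 = true) ∨ (x = 4 ∧ f4 = true) := by
  unfold flagList
  cases f1 <;> cases f2 <;> cases f3 <;> cases f4 <;> simp

theorem fold_length (cs : List Char) :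
    (cs.foldl thirdStep PySem.Set.empty).length =
      (cond (cs.any (fun c => decide ('A'.toNat ≤ c.toNat ∧ c.toNat ≤ 'Z'.toNat))) 1 0)
      + (cond (cs.any (fun c => decide ('a'.toNat ≤ c.toNat ∧ c.toNat ≤ 'z'.toNat))) 1 0)
      + (cond (cs.any (fun c => decide ('0'.toNat ≤ c.toNat ∧ c.toNat ≤ '9'.toNat))) 1 0)
      + (cond (cs.any (fun c => decide (c ∈ thirdSpecials))) 1 0) := by
  set f1 := cs.any (fun c => decide ('A'.toNat ≤ c.toNat ∧ c.toNat ≤ 'Z'.toNat)) with hf1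
  set f2 := cs.any (fun c => decide ('a'.toNat ≤ c.toNat ∧ c.toNat ≤ 'z'.toNat)) with hf2
  set f3 := cs.any (fun c => decide ('0'.toNat ≤ c.toNat ∧ c.toNat ≤ '9'.toNat)) with hf3
  set f4 := cs.any (fun c => decide (c ∈ thirdSpecials)) with hf4
  rw [← flagList_length f1 f2 f3 f4]
  apply List.Perm.length_eq
  apply List.perm_of_nodup_nodup_toFinset_eq
  · exact nodup_fold cs PySem.Set.empty List.nodup_nil
  · exact flagList_nodup f1 f2 f3 f4
  · ext x
    simp only [List.mem_toFinset, mem_fold, mem_flagList]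
    constructor
    · rintro (hx | ⟨c, hc, hcx⟩)
      · simp [PySem.Set.empty] at hx
      · rcases class_range c x hcx with rfl | rfl | rfl | rfl
        · refine Or.inl ⟨rfl, ?_⟩
          rw [hf1, List.any_eq_true]
          exact ⟨c, hc, by rw [decide_eq_true_iff]; exact (class_upper c).mp hcx⟩
        · refine Or.inr (Or.inl ⟨rfl, ?_⟩)
          rw [hf2, List.any_eq_true]
          exact ⟨c, hc, by rw [decide_eq_true_iff]; exact (class_lower c).mp hcx⟩
        · refine Or.inr (Or.inr (Or.inl ⟨rfl, ?_⟩))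
          rw [hf3, List.any_eq_true]
          exact ⟨c, hc, by rw [decide_eq_true_iff]; exact (class_digit c).mp hcx⟩
        · refine Or.inr (Or.inr (Or.inr ⟨rfl, ?_⟩))
          rw [hf4, List.any_eq_true]
          exact ⟨c, hc, by rw [decide_eq_true_iff]; exact (class_special c).mp hcx⟩
    · rintro (⟨rfl, hf⟩ | ⟨rfl, hf⟩ | ⟨rfl, hf⟩ | ⟨rfl, hf⟩)
      all_goals rw [List.any_eq_true] at hf
      all_goals obtain ⟨c, hc, hp⟩ := hf
      all_goals rw [decide_eq_true_iff] at hp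
      · exact Or.inr ⟨c, hc, (class_upper c).mpr hp⟩
      · exact Or.inr ⟨c, hc, (class_lower c).mpr hp⟩
      · exact Or.inr ⟨c, hc, (class_digit c).mpr hp⟩
      · exact Or.inr ⟨c, hc, (class_special c).mpr hp⟩

-- ===== VERDICT (by name: the statement is the Claim_ definition above) =====
theorem third_spec : Claim_equal_third := by
  intro s _
  unfold Spec_third third third_alt
  simp only [PySem.Set.len, fold_length]
  rw [decide_eq_decide]
  exact_mod_cast Iff.rfl
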